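-- pv_equiv track=rewrite | github.com/devinplauche/Moss-Machines-Magic-the-Gathering-sorting-from-scanner | Old versions/Version 1/Program Files/detectname.py | is_reasonable_text
-- ===== SOURCE A (Python) =====
-- def is_reasonable_text(text):
--     """Check if text looks like a plausible word/name without being too strict"""
--     text = text.lower().strip()
--     if len(text) < 2:  # Too short
--         return False
--
--     # Very unlikely letter combinations
--     forbidden_combos = ['zx', 'xj', 'qj', 'jq', 'qz', 'vw', 'vv', 'jk', 'kj']
--     for combo in forbidden_combos:
--         if combo in text:
--             return False
--
--     # Should have at least one vowel (unless it's a very short abbreviation)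
--     vowels = {'a', 'e', 'i', 'o', 'u'}
--     if len(text) > 3 and not any(vowel in text for vowel in vowels):
--         return False
--
--     return True
-- ===== SOURCE B (Python) =====
-- def is_reasonable_text(text):
--     """Single pass: track previous char for forbidden bigrams and a vowel flag."""
--     text = text.lower().strip()
--     if len(text) < 2:
--         return False
--     forbidden = {('z', 'x'), ('x', 'j'), ('q', 'j'), ('j', 'q'), ('q', 'z'),
--                  ('v', 'w'), ('v', 'v'), ('j', 'k'), ('k', 'j')}
--     prev = None
--     vowel_seen = False
--     for ch in text:
--         if prev is not None and (prev, ch) in forbidden: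
--             return False
--         if ch in 'aeiou':
--             vowel_seen = True
--         prev = ch
--     return vowel_seen or len(text) <= 3
-- ===== Notes on version B (the rewrite author's own statement) =====
-- stated objective: alternative
-- what changed: Replaces A's nine separate substring scans plus a per-vowel any-scan with a single char-by-char pass that tracks the previous character (checking each adjacent pair against a set of forbidden bigrams) and a vowel-seen flag.
import Mathlib
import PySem

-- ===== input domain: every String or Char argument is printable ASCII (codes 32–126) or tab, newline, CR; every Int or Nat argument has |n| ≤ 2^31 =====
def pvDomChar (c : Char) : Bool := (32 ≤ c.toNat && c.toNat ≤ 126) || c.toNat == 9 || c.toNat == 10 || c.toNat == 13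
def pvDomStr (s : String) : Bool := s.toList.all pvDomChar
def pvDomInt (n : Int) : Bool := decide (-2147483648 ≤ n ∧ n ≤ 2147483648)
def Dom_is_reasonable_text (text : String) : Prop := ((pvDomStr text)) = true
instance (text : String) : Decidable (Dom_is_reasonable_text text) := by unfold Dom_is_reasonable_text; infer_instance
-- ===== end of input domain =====

-- B replaces A's nine substring scans and a separate vowel scan with one char-by-char
-- pass maintaining a previous-character and a vowel-seen flag (objective: alternative).

-- ===== PORT A =====
def forbiddenCombosA : List String := ["zx", "xj", "qj", "jq", "qz", "vw", "vv", "jk", "kj"]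

def vowelsA : List String := ["a", "e", "i", "o", "u"]

def is_reasonable_text (text : String) : Bool :=
  let t := PySem.Str.strip (PySem.Str.lower text)
  if PySem.Str.len t < 2 then false
  else if forbiddenCombosA.any (fun combo => PySem.Str.isIn combo t) then false
  else if decide (3 < PySem.Str.len t) && !(vowelsA.any (fun v => PySem.Str.isIn v t)) then false
  else true

-- ===== PORT B =====
def forbiddenPairsB : List (Char × Char) :=
  [('z','x'), ('x','j'), ('q','j'), ('j','q'), ('q','z'), ('v','w'), ('v','v'), ('j','k'), ('k','j')]

def isVowelB (c : Char) : Bool := "aeiou".toList.contains c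

-- the single pass: `none` = early `return False` on a forbidden adjacent pair
def bScan (prev : Option Char) (vseen : Bool) : List Char → Option Bool
  | [] => some vseen
  | c :: rest =>
      if (match prev with | some p => forbiddenPairsB.contains (p, c) | none => false) then none
      else bScan (some c) (vseen || isVowelB c) rest

def is_reasonable_text_alt (text : String) : Bool :=
  let t := PySem.Str.strip (PySem.Str.lower text)
  if PySem.Str.len t < 2 then false
  else
    match bScan none false t.toList with
    | none => false
    | some vseen => vseen || decide (PySem.Str.len t ≤ 3)

-- ===== PRECONDITION & SPEC =====
def Spec_is_reasonable_text (text : String) (out : Bool) : Prop := out = is_reasonable_text_alt text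
instance (text : String) (out : Bool) : Decidable (Spec_is_reasonable_text text out) := by unfold Spec_is_reasonable_text; infer_instance

-- ===== CLAIM (what is proved, stated in full; the proofs are below) =====
def Claim_equal_is_reasonable_text : Prop := ∀ (text : String), Dom_is_reasonable_text text → Spec_is_reasonable_text text (is_reasonable_text text)

-- ===== LEMMAS AND PROOFS =====

def hasBad : List Char → Bool
  | a :: b :: r => forbiddenPairsB.contains (a, b) || hasBad (b :: r)
  | _ => false

-- literal-list bridges (both sides unfold to the same boolean expression)
lemma combos_pairs (l : List Char) :
    forbiddenCombosA.any (fun combo => PySem.Chars.isIn combo.toList l) =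
      forbiddenPairsB.any (fun p => PySem.Chars.isIn [p.1, p.2] l) := rfl

lemma vowels_chars (l : List Char) :
    vowelsA.any (fun v => PySem.Chars.isIn v.toList l) =
      ['a','e','i','o','u'].any (fun c => PySem.Chars.isIn [c] l) := rfl

lemma bScan_some (l : List Char) : ∀ (p : Char) (v : Bool),
    bScan (some p) v l = if hasBad (p :: l) then none else some (v || l.any isVowelB) := by
  induction l with
  | nil => intro p v; simp [bScan, hasBad]
  | cons c r ih =>
      intro p v
      by_cases h : (p, c) ∈ forbiddenPairsB
      · simp [bScan, hasBad, List.contains_eq_mem, h]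
      · simp only [bScan, hasBad, List.contains_eq_mem, h, decide_false, ih,
          Bool.false_or, List.any_cons]
        simp [Bool.or_assoc]

lemma bScan_start (l : List Char) :
    bScan none false l = if hasBad l then none else some (l.any isVowelB) := by
  cases l with
  | nil => simp [bScan, hasBad]
  | cons c r => simp [bScan, bScan_some, List.any_cons]

lemma hasBad_iff (l : List Char) :
    hasBad l = true ↔ ∃ p ∈ forbiddenPairsB, [p.1, p.2] <:+: l := by
  induction l with
  | nil =>
      rw [show hasBad [] = false from rfl]
      simp only [Bool.false_eq_true, false_iff]
      rintro ⟨p, _, h⟩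
      simpa using h.length_le
  | cons c r ih =>
      cases r with
      | nil =>
          rw [show hasBad [c] = false from rfl]
          simp only [Bool.false_eq_true, false_iff]
          rintro ⟨p, _, h⟩
          simpa using h.length_le
      | cons b r' =>
          simp only [hasBad, Bool.or_eq_true, ih, List.contains_eq_mem, decide_eq_true_eq]
          constructor
          · rintro (h | ⟨p, hp, hinf⟩)
            · exact ⟨(c, b), h, ⟨[], r', rfl⟩⟩
            · exact ⟨p, hp, List.infix_cons hinf⟩
          · rintro ⟨p, hp, hinf⟩
            rcases List.infix_cons_iff.mp hinf with hpre | hinf'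
            · obtain ⟨h1, h2⟩ := List.cons_prefix_cons.mp hpre
              obtain ⟨h3, _⟩ := List.cons_prefix_cons.mp h2
              exact Or.inl (by rw [show p = (c, b) from Prod.ext h1 h3] at hp; exact hp)
            · exact Or.inr ⟨p, hp, hinf'⟩

lemma hasBad_eq (l : List Char) :
    hasBad l = forbiddenCombosA.any (fun combo => PySem.Chars.isIn combo.toList l) := by
  rw [combos_pairs, Bool.eq_iff_iff, hasBad_iff]
  simp only [List.any_eq_true, PySem.Chars.isIn_iff_infix]

lemma vowels_eq (l : List Char) :
    l.any isVowelB = vowelsA.any (fun v => PySem.Chars.isIn v.toList l) := by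
  rw [vowels_chars, Bool.eq_iff_iff]
  simp only [List.any_eq_true, PySem.Chars.isIn_iff_infix, List.singleton_infix_iff, isVowelB,
    List.contains_eq_mem, decide_eq_true_eq]
  constructor
  · rintro ⟨c, hc, hv⟩; exact ⟨c, by simpa using hv, hc⟩
  · rintro ⟨c, hv, hc⟩; exact ⟨c, hc, by simpa using hv⟩

-- ===== VERDICT (by name: the statement is the Claim_ definition above) =====
theorem is_reasonable_text_spec : Claim_equal_is_reasonable_text := by
  intro text _
  unfold Spec_is_reasonable_text is_reasonable_text is_reasonable_text_alt
  set t := PySem.Str.strip (PySem.Str.lower text) with ht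
  clear_value t
  have hL : PySem.Str.len t = (t.toList.length : Int) := by simp [PySem.Str.len]
  simp only [bScan_start, hasBad_eq, PySem.Str.isIn_eq, hL]
  by_cases h2 : ((t.toList.length : Int) < 2)
  · rw [if_pos h2, if_pos h2]
  · rw [if_neg h2, if_neg h2]
    rcases hb : forbiddenCombosA.any (fun combo => PySem.Chars.isIn combo.toList t.toList) with _ | _
    · simp only [Bool.false_eq_true, if_false]
      rw [← vowels_eq]
      rcases hv : t.toList.any isVowelB with _ | _
      · simp only [Bool.not_false, Bool.false_or]
        by_cases h3 : ((3 : Int) < (t.toList.length : Int))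
        · simp only [h3, decide_true, Bool.true_and, if_true]
          have hnat : t.toList.length = t.length := by simp
          simp
          omega
        · simp only [h3, decide_false, Bool.false_and, Bool.false_eq_true, if_false]
          have hnat : t.toList.length = t.length := by simp
          simp
          omega
      · simp
    · simp only [if_true]
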